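-- pv_equiv track=rewrite | github.com/firefly0916/liars_bar | liars_game_engine/agents/prompts.py | _legal_action_types
-- ===== SOURCE A (Python) =====
-- def _legal_action_types(observation: dict[str, object]) -> list[str]:
--     legal_actions = observation.get("legal_actions", [])
--     if not isinstance(legal_actions, list):
--         return ["play_claim", "challenge"]
--
--     ordered_types: list[str] = []
--     for candidate in ("play_claim", "challenge", "pass"):
--         if any(isinstance(item, dict) and str(item.get("type", "")) == candidate for item in legal_actions):
--             ordered_types.append(candidate)
--     return ordered_types or ["play_claim", "challenge"]
-- ===== SOURCE B (Python) =====
-- _TABLE = [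
--     ["play_claim", "challenge"],            # 0: nothing present -> fallback
--     ["play_claim"],                          # 1
--     ["challenge"],                           # 2
--     ["play_claim", "challenge"],            # 3
--     ["pass"],                                # 4
--     ["play_claim", "pass"],                 # 5
--     ["challenge", "pass"],                  # 6
--     ["play_claim", "challenge", "pass"],    # 7
-- ]
--
--
-- def _legal_action_types(observation: dict[str, object]) -> list[str]:
--     legal_actions = observation.get("legal_actions", [])
--     if not isinstance(legal_actions, list):
--         return ["play_claim", "challenge"]
--     mask = 0
--     for item in legal_actions:
--         if isinstance(item, dict):
--             t = str(item.get("type", ""))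
--             if t == "play_claim":
--                 mask |= 1
--             elif t == "challenge":
--                 mask |= 2
--             elif t == "pass":
--                 mask |= 4
--     return list(_TABLE[mask])
-- ===== Notes on version B (the rewrite author's own statement) =====
-- stated objective: alternative
-- what changed: B makes one pass over legal_actions accumulating a 3-bit presence bitmask and decodes the answer from an 8-entry lookup table (with the empty fallback absorbed as table entry 0), instead of A's three any-scans that build an ordered list plus an explicit or-fallback.
import Mathlib
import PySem

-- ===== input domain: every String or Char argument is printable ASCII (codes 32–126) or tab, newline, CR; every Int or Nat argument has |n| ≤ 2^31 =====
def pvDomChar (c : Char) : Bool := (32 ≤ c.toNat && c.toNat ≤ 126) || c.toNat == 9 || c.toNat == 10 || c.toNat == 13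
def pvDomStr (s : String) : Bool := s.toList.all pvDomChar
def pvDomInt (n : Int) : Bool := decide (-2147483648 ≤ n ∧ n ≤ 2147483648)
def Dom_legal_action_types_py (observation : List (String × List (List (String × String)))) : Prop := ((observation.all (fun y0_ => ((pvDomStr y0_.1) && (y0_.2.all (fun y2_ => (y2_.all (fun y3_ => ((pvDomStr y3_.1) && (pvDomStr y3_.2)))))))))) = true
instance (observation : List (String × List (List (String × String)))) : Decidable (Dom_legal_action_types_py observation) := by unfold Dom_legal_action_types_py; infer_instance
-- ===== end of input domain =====

-- B accumulates a 3-bit presence bitmask in one pass and decodes the result from an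
-- 8-entry lookup table (the empty fallback is table entry 0), instead of A's three
-- any-scans building an ordered list plus an or-fallback (alternative decomposition).
-- Under the typed domain legal_actions is always a list of dicts of strings, so the
-- isinstance guards and str() of both Pythons are statically trivial and vanish here.

-- ===== PORT A =====
def legal_action_types_py (observation : List (String × List (List (String × String)))) : List String :=
  let legal_actions := PySem.Dict.getD (PySem.Dict.mk observation) "legal_actions" []
  let ordered_types := ["play_claim", "challenge", "pass"].foldl
    (fun acc candidate =>
      if legal_actions.any (fun item => PySem.Dict.getD (PySem.Dict.mk item) "type" "" == candidate)
      then acc ++ [candidate] else acc) []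
  if ordered_types.isEmpty then ["play_claim", "challenge"] else ordered_types

-- ===== PORT B =====
def pvTable : List (List String) :=
  [["play_claim", "challenge"],
   ["play_claim"],
   ["challenge"],
   ["play_claim", "challenge"],
   ["pass"],
   ["play_claim", "pass"],
   ["challenge", "pass"],
   ["play_claim", "challenge", "pass"]]

def legal_action_types_py_alt (observation : List (String × List (List (String × String)))) : List String :=
  let legal_actions := PySem.Dict.getD (PySem.Dict.mk observation) "legal_actions" []
  let mask : Nat := legal_actions.foldl
    (fun m item =>
      let t := PySem.Dict.getD (PySem.Dict.mk item) "type" ""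
      if t == "play_claim" then m ||| 1
      else if t == "challenge" then m ||| 2
      else if t == "pass" then m ||| 4
      else m) 0
  -- _TABLE[mask]: exact, the mask only ever accumulates bits 1,2,4 so mask < 8 = length
  pvTable.getD mask []

-- ===== PRECONDITION & SPEC =====
def Spec_legal_action_types_py (observation : List (String × List (List (String × String)))) (out : List String) : Prop := out = legal_action_types_py_alt observation
instance (observation : List (String × List (List (String × String)))) (out : List String) : Decidable (Spec_legal_action_types_py observation out) := by unfold Spec_legal_action_types_py; infer_instance

-- ===== CLAIM (what is proved, stated in full; the proofs are below) =====
def Claim_equal_legal_action_types_py : Prop := ∀ (observation : List (String × List (List (String × String)))), Dom_legal_action_types_py observation → Spec_legal_action_types_py observation (legal_action_types_py observation)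

-- ===== LEMMAS AND PROOFS =====

-- the bit contributed by one item of B's single pass
def pvBit (item : List (String × String)) : Nat :=
  let t := PySem.Dict.getD (PySem.Dict.mk item) "type" ""
  if t == "play_claim" then 1
  else if t == "challenge" then 2
  else if t == "pass" then 4
  else 0

theorem foldl_mask_lor (la : List (List (String × String))) (m : Nat) :
    la.foldl
      (fun m item =>
        let t := PySem.Dict.getD (PySem.Dict.mk item) "type" ""
        if t == "play_claim" then m ||| 1
        else if t == "challenge" then m ||| 2
        else if t == "pass" then m ||| 4
        else m) m
    = m ||| la.foldl
      (fun m item =>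
        let t := PySem.Dict.getD (PySem.Dict.mk item) "type" ""
        if t == "play_claim" then m ||| 1
        else if t == "challenge" then m ||| 2
        else if t == "pass" then m ||| 4
        else m) 0 := by
  induction la generalizing m with
  | nil => simp
  | cons i la ih =>
    simp only [List.foldl_cons]
    rw [ih]
    conv_rhs => rw [ih]
    split_ifs <;> simp [Nat.lor_assoc]

-- B's one-pass mask, characterised by A's three any-scans
theorem mask_eq_any (la : List (List (String × String))) :
    la.foldl
      (fun m item =>
        let t := PySem.Dict.getD (PySem.Dict.mk item) "type" ""
        if t == "play_claim" then m ||| 1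
        else if t == "challenge" then m ||| 2
        else if t == "pass" then m ||| 4
        else m) 0
    = (cond (la.any (fun item => PySem.Dict.getD (PySem.Dict.mk item) "type" "" == "play_claim")) 1 0)
      ||| (cond (la.any (fun item => PySem.Dict.getD (PySem.Dict.mk item) "type" "" == "challenge")) 2 0)
      ||| (cond (la.any (fun item => PySem.Dict.getD (PySem.Dict.mk item) "type" "" == "pass")) 4 0) := by
  induction la with
  | nil => rfl
  | cons i la ih =>
    simp only [List.foldl_cons, List.any_cons]
    rw [foldl_mask_lor, ih]
    generalize la.any (fun item => PySem.Dict.getD (PySem.Dict.mk item) "type" "" == "play_claim") = a1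
    generalize la.any (fun item => PySem.Dict.getD (PySem.Dict.mk item) "type" "" == "challenge") = a2
    generalize la.any (fun item => PySem.Dict.getD (PySem.Dict.mk item) "type" "" == "pass") = a3
    split_ifs with h1 h2 h3
    · simp only [beq_iff_eq] at h1
      simp only [h1]
      cases a1 <;> cases a2 <;> cases a3 <;> decide
    · simp only [beq_iff_eq] at h2
      simp only [h2]
      cases a1 <;> cases a2 <;> cases a3 <;> decide
    · simp only [beq_iff_eq] at h3
      simp only [h3]
      cases a1 <;> cases a2 <;> cases a3 <;> decide
    · simp only [Bool.not_eq_true] at h1 h2 h3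
      simp only [h1, h2, h3]
      cases a1 <;> cases a2 <;> cases a3 <;> decide

-- ===== VERDICT (by name: the statement is the Claim_ definition above) =====
theorem legal_action_types_py_spec : Claim_equal_legal_action_types_py := by
  intro observation _
  unfold Spec_legal_action_types_py
  simp only [legal_action_types_py, legal_action_types_py_alt, List.foldl, mask_eq_any]
  generalize (PySem.Dict.getD (PySem.Dict.mk observation) "legal_actions" []).any
      (fun item => PySem.Dict.getD (PySem.Dict.mk item) "type" "" == "play_claim") = b1
  generalize (PySem.Dict.getD (PySem.Dict.mk observation) "legal_actions" []).any
      (fun item => PySem.Dict.getD (PySem.Dict.mk item) "type" "" == "challenge") = b2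
  generalize (PySem.Dict.getD (PySem.Dict.mk observation) "legal_actions" []).any
      (fun item => PySem.Dict.getD (PySem.Dict.mk item) "type" "" == "pass") = b3
  cases b1 <;> cases b2 <;> cases b3 <;> rfl
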